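-- pv_equiv track=rewrite | github.com/poding84/dbassignment | databaseRepository.py | _show_query
-- ===== SOURCE A (Python) =====
-- def _show_query(column_list, rows, widths):
--     line = "\n"
--     col_list = [c.upper() for c in column_list]
--     for vars in [None, col_list, None, *rows, None]:
--         for index in range(len(widths)):
--             if vars is None:
--                 line += "+" + "-" * (widths[index]+2)
--             else:
--                 line += "| " + vars[index] + " " * (widths[index] - len(vars[index]) + 1)
--
--         if vars is None:
--             line += "+\n"
--         else:
--             line += "|\n"
--
--     return line
-- ===== SOURCE B (Python) =====
-- def _show_query(column_list, rows, widths):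
--     # Column-major: build one vertical strip of cell segments per column,
--     # then read the grid back line by line (transpose), appending line ends.
--     def cell(v, w):
--         return "| " + v + " " * (w - len(v) + 1)
--
--     strips = []
--     for j, w in enumerate(widths):
--         dash = "+" + "-" * (w + 2)
--         strips.append([dash, cell(column_list[j].upper(), w), dash]
--                       + [cell(r[j], w) for r in rows] + [dash])
--     ends = ["+\n", "|\n", "+\n"] + ["|\n"] * len(rows) + ["+\n"]
--
--     out = "\n"
--     for i in range(len(ends)):
--         for strip in strips:
--             out += strip[i]
--         out += ends[i]
--     return out
-- ===== Notes on version B (the rewrite author's own statement) =====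
-- stated objective: alternative
-- what changed: B builds the table column-major: for each column it constructs a vertical strip of pre-rendered segments (dash segment, header cell, dashes, row cells), then transposes, reading the grid back line by line and appending per-line terminators, instead of A's row-major sentinel-list loop branching on None per cell.
import Mathlib
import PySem

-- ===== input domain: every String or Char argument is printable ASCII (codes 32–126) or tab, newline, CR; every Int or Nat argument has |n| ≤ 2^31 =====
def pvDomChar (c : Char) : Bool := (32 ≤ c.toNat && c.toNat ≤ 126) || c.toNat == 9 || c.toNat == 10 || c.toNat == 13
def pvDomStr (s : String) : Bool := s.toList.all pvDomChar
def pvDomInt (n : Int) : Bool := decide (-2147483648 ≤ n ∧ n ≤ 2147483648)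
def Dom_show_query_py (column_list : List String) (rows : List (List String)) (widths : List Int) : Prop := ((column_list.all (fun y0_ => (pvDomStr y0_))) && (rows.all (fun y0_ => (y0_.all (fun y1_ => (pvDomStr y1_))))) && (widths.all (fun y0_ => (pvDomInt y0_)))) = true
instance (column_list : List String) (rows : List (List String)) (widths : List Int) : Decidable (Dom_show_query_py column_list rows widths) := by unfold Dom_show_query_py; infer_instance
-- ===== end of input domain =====

-- B renders the table column-major (one vertical strip of segments per column,
-- then a transposed line-by-line read); A is row-major over a None-sentinel list.

-- ===== PORT A =====
-- Literal port of A: line accumulator, header uppercased, one loop over the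
-- None-sentinel item list, inner loop over range(len(widths)) testing the sentinel.
-- vars[index] raises IndexError when vars is too short: totalized with getD "",
-- excluded by Pre_show_query_py.  "s" * n is PySem.List.pyRepeat on the char list.
def show_query_py (column_list : List String) (rows : List (List String)) (widths : List Int) : String :=
  let col_list := column_list.map PySem.Str.upper
  let items : List (Option (List String)) := [none, some col_list, none] ++ rows.map some ++ [none]
  String.ofList <| items.foldl (fun line vars =>
    let line := (List.range widths.length).foldl (fun line index =>
      match vars with
      | none => line ++ ['+'] ++ PySem.List.pyRepeat ['-'] (widths.getD index 0 + 2)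
      | some vs => line ++ "| ".toList ++ (vs.getD index "").toList
          ++ PySem.List.pyRepeat [' '] (widths.getD index 0 - (PySem.Str.len (vs.getD index "") : Int) + 1)) line
    match vars with
    | none => line ++ "+\n".toList
    | some _ => line ++ "|\n".toList) "\n".toList

-- ===== PORT B =====
-- cell(v, w): one padded data cell segment.
def sqCell (v : String) (w : Int) : List Char :=
  "| ".toList ++ v.toList ++ PySem.List.pyRepeat [' '] (w - (PySem.Str.len v : Int) + 1)

-- the vertical strip of segments for column j (dash, header cell, dash, row cells, dash);
-- column_list[j] / r[j] raise IndexError when too short: totalized with getD "", excluded by Pre_.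
def sqStrip (column_list : List String) (rows : List (List String)) (j : Nat) (w : Int) : List (List Char) :=
  let dash := ['+'] ++ PySem.List.pyRepeat ['-'] (w + 2)
  [dash, sqCell (PySem.Str.upper (column_list.getD j "")) w, dash]
    ++ rows.map (fun r => sqCell (r.getD j "") w) ++ [dash]

def show_query_py_alt (column_list : List String) (rows : List (List String)) (widths : List Int) : String :=
  let strips := (List.range widths.length).map (fun j => sqStrip column_list rows j (widths.getD j 0))
  let ends : List (List Char) := ["+\n".toList, "|\n".toList, "+\n".toList]
    ++ rows.map (fun _ => "|\n".toList) ++ ["+\n".toList]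
  String.ofList <| (List.range ends.length).foldl (fun out i =>
    strips.foldl (fun out strip => out ++ strip.getD i []) out ++ ends.getD i []) "\n".toList

-- ===== PRECONDITION & SPEC =====
-- A raises IndexError iff column_list or some row is shorter than widths; Pre_ excludes exactly that.
def Pre_show_query_py (column_list : List String) (rows : List (List String)) (widths : List Int) : Prop :=
  widths.length ≤ column_list.length ∧ ∀ r ∈ rows, widths.length ≤ r.length
instance (column_list : List String) (rows : List (List String)) (widths : List Int) : Decidable (Pre_show_query_py column_list rows widths) := by unfold Pre_show_query_py; infer_instance

def pvWitness_show_query_py : List String × List (List String) × List Int := (["id", "name"], [["1", "ab"], ["2", ""]], [2, 4])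

def Spec_show_query_py (column_list : List String) (rows : List (List String)) (widths : List Int) (out : String) : Prop := out = show_query_py_alt column_list rows widths
instance (column_list : List String) (rows : List (List String)) (widths : List Int) (out : String) : Decidable (Spec_show_query_py column_list rows widths out) := by unfold Spec_show_query_py; infer_instance

-- ===== CLAIM (what is proved, stated in full; the proofs are below) =====
def Claim_equal_show_query_py : Prop := ∀ (column_list : List String) (rows : List (List String)) (widths : List Int), Dom_show_query_py column_list rows widths → Pre_show_query_py column_list rows widths → Spec_show_query_py column_list rows widths (show_query_py column_list rows widths)

-- ===== LEMMAS AND PROOFS =====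

-- A's per-line item list (the sentinel list)
def sqItems (column_list : List String) (rows : List (List String)) : List (Option (List String)) :=
  [none, some (column_list.map PySem.Str.upper), none] ++ rows.map some ++ [none]

-- one cell segment of line `vars`, column j  (common shape of both programs)
def sqSeg (widths : List Int) (vars : Option (List String)) (j : Nat) : List Char :=
  match vars with
  | none => ['+'] ++ PySem.List.pyRepeat ['-'] (widths.getD j 0 + 2)
  | some vs => sqCell (vs.getD j "") (widths.getD j 0)

-- full line of `vars`: all cell segments plus the terminator
def sqLine (widths : List Int) (vars : Option (List String)) : List Char :=
  (List.range widths.length).flatMap (sqSeg widths vars) ++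
    (match vars with | none => "+\n".toList | some _ => "|\n".toList)

lemma upper_getD (o : Option String) :
    (o.map PySem.Str.upper).getD "" = PySem.Str.upper (o.getD "") := by
  cases o <;> rfl

-- B's strip for column j is A's item list mapped through the segment function
lemma strip_eq_map (column_list : List String) (rows : List (List String)) (widths : List Int) (j : Nat) :
    sqStrip column_list rows j (widths.getD j 0)
      = (sqItems column_list rows).map (fun o => sqSeg widths o j) := by
  simp [sqStrip, sqItems, sqSeg, upper_getD, Function.comp_def]

lemma map_getD_of_lt {α β : Type} (f : α → β) (l : List α) (i : Nat) (h : i < l.length)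
    (d : β) (d' : α) : (l.map f).getD i d = f (l.getD i d') := by
  rw [List.getD_eq_getElem _ _ (by simpa using h), List.getD_eq_getElem _ _ h, List.getElem_map]

lemma flatMap_range_getD {α β : Type} (g : α → List β) (l : List α) (d : α) :
    (List.range l.length).flatMap (fun i => g (l.getD i d)) = l.flatMap g := by
  induction l with
  | nil => simp
  | cons x t ih =>
    simp only [List.length_cons, List.range_succ_eq_map, List.flatMap_cons, List.flatMap_map,
      List.getD_cons_zero]
    simpa using congrArg (g x ++ ·) ih

lemma foldl_range_getD {α β : Type} (g : α → List β) (l : List α) (d : α) (init : List β) :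
    (List.range l.length).foldl (fun acc i => acc ++ g (l.getD i d)) init
      = init ++ l.flatMap g := by
  rw [PySem.List.foldl_append_eq_flatMap, flatMap_range_getD]

-- A equals the canonical form: "\n" followed by the lines of the sentinel list
lemma showA_eq (column_list : List String) (rows : List (List String)) (widths : List Int) :
    show_query_py column_list rows widths
      = String.ofList ("\n".toList ++ (sqItems column_list rows).flatMap (sqLine widths)) := by
  unfold show_query_py
  refine congrArg String.ofList ?_
  rw [show ([none, some (column_list.map PySem.Str.upper), none] ++ rows.map some ++ [none])
        = sqItems column_list rows from rfl]
  rw [PySem.List.foldl_congr_mem _ _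
      (fun (line : List Char) (vars : Option (List String)) => line ++ sqLine widths vars) _ ?_]
  · rw [PySem.List.foldl_append_eq_flatMap]
  · intro line vars _
    cases vars with
    | none =>
      show (List.range widths.length).foldl
          (fun l i => l ++ ['+'] ++ PySem.List.pyRepeat ['-'] (widths.getD i 0 + 2)) line ++ "+\n".toList
        = line ++ sqLine widths none
      have : ∀ (l : List Char) (i : Nat),
          l ++ ['+'] ++ PySem.List.pyRepeat ['-'] (widths.getD i 0 + 2) = l ++ sqSeg widths none i := by
        intro l i; simp [sqSeg]
      rw [PySem.List.foldl_congr_mem _ _ (fun l i => l ++ sqSeg widths none i) _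
          (fun l i _ => this l i), PySem.List.foldl_append_eq_flatMap]
      simp [sqLine]
    | some vs =>
      show (List.range widths.length).foldl
          (fun l i => l ++ "| ".toList ++ (vs.getD i "").toList
            ++ PySem.List.pyRepeat [' '] (widths.getD i 0 - (PySem.Str.len (vs.getD i "") : Int) + 1)) line
          ++ "|\n".toList
        = line ++ sqLine widths (some vs)
      have : ∀ (l : List Char) (i : Nat),
          l ++ "| ".toList ++ (vs.getD i "").toList
            ++ PySem.List.pyRepeat [' '] (widths.getD i 0 - (PySem.Str.len (vs.getD i "") : Int) + 1)
          = l ++ sqSeg widths (some vs) i := by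
        intro l i; simp [sqSeg, sqCell]
      rw [PySem.List.foldl_congr_mem _ _ (fun l i => l ++ sqSeg widths (some vs) i) _
          (fun l i _ => this l i), PySem.List.foldl_append_eq_flatMap]
      simp [sqLine]

lemma ends_eq_map (column_list : List String) (rows : List (List String)) :
    (["+\n".toList, "|\n".toList, "+\n".toList]
        ++ rows.map (fun _ => "|\n".toList) ++ ["+\n".toList] : List (List Char))
      = (sqItems column_list rows).map
          (fun o => match o with | none => "+\n".toList | some _ => "|\n".toList) := by
  simp [sqItems, Function.comp_def]

-- B equals the same canonical form
lemma showB_eq (column_list : List String) (rows : List (List String)) (widths : List Int) :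
    show_query_py_alt column_list rows widths
      = String.ofList ("\n".toList ++ (sqItems column_list rows).flatMap (sqLine widths)) := by
  unfold show_query_py_alt
  refine congrArg String.ofList ?_
  have hlen : (["+\n".toList, "|\n".toList, "+\n".toList]
      ++ rows.map (fun _ => "|\n".toList) ++ ["+\n".toList] : List (List Char)).length
      = (sqItems column_list rows).length := by
    simp [sqItems]
  rw [hlen]
  rw [PySem.List.foldl_congr_mem _ _
      (fun (out : List Char) (i : Nat) => out ++ sqLine widths ((sqItems column_list rows).getD i none)) _ ?_]
  · rw [foldl_range_getD]
  · intro out i hi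
    have hi' : i < (sqItems column_list rows).length := by simpa using List.mem_range.mp hi
    have hstrip : ∀ j : Nat,
        (sqStrip column_list rows j (widths.getD j 0)).getD i []
          = sqSeg widths ((sqItems column_list rows).getD i none) j := by
      intro j
      rw [strip_eq_map, map_getD_of_lt _ _ _ (by simpa using hi') _ none]
    show ((List.range widths.length).map
        (fun j => sqStrip column_list rows j (widths.getD j 0))).foldl
          (fun out strip => out ++ strip.getD i []) out
        ++ (["+\n".toList, "|\n".toList, "+\n".toList]
            ++ rows.map (fun _ => "|\n".toList) ++ ["+\n".toList] : List (List Char)).getD i []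
      = out ++ sqLine widths ((sqItems column_list rows).getD i none)
    rw [List.foldl_map, PySem.List.foldl_congr_mem _ _
        (fun (out : List Char) (j : Nat) => out ++ sqSeg widths ((sqItems column_list rows).getD i none) j) _
        (fun out j _ => by rw [hstrip j]),
      PySem.List.foldl_append_eq_flatMap,
      ends_eq_map column_list rows,
      map_getD_of_lt _ _ _ (by simpa using hi') _ none]
    simp [sqLine]

-- ===== VERDICT (by name: the statement is the Claim_ definition above) =====
theorem show_query_py_spec : Claim_equal_show_query_py := by
  intro column_list rows widths _ _
  unfold Spec_show_query_py
  rw [showA_eq, showB_eq]
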